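-- pv_equiv track=rewrite | github.com/antoinealb/swiss-unity-league | championship/tournament_valid.py | simulate_tournament_max_points
-- ===== SOURCE A (Python) =====
-- def simulate_tournament_max_points(num_players, num_rounds):
--     """
--     Simulates a Swiss style tournament and calculates the match points earned by each player. In each round the better performing player will win the match.
--
--     Args:
--         num_players (int): The number of players in the tournament.
--         num_rounds (int): The number of rounds for the tournament.
--
--     Returns:
--         list: A list of match points earned by each player.
--     """
--     points = [0] * num_players
--     for i in range(num_rounds):
--         for i in range(num_players):
--             if i % 2 == 0:
--                 points[i] += 3
--         points.sort(reverse=True)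
--     return points
-- ===== SOURCE B (Python) =====
-- def merge_desc(xs, ys):
--     out = []
--     i = j = 0
--     while i < len(xs) and j < len(ys):
--         if xs[i] >= ys[j]:
--             out.append(xs[i])
--             i += 1
--         else:
--             out.append(ys[j])
--             j += 1
--     out.extend(xs[i:])
--     out.extend(ys[j:])
--     return out
--
--
-- def simulate_tournament_max_points(num_players, num_rounds):
--     # The list is kept sorted descending between rounds, so instead of
--     # re-sorting after awarding 3 points to every even position, split it
--     # into the (still sorted) winners' and losers' runs and merge them.
--     pts = [0] * num_players
--     for _ in range(num_rounds):
--         winners = []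
--         losers = []
--         even = True
--         for p in pts:
--             if even:
--                 winners.append(p + 3)
--             else:
--                 losers.append(p)
--             even = not even
--         pts = merge_desc(winners, losers)
--     return pts
-- ===== Notes on version B (the rewrite author's own statement) =====
-- stated objective: alternative
-- what changed: Instead of awarding 3 points at every even index and re-sorting the whole list each round, B exploits that the list stays sorted descending: it splits it into the winners' run (+3) and losers' run, which are each still sorted, and merges the two runs, eliminating the per-round sort.
import Mathlib
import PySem

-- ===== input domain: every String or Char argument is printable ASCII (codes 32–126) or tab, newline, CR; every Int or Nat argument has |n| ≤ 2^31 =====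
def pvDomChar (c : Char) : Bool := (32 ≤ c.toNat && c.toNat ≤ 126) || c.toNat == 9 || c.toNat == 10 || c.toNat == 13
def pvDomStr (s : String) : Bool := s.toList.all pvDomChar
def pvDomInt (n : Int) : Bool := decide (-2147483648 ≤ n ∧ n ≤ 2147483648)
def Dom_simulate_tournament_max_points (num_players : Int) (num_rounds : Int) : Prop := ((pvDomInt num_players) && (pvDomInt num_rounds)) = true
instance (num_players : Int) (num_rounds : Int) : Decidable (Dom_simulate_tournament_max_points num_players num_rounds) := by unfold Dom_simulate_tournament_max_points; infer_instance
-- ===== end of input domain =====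

-- B keeps the list sorted between rounds and MERGES the two sorted runs
-- (winners+3, losers) instead of awarding points by index and re-sorting
-- (objective: alternative algorithm, merge instead of sort).

-- ===== PORT A =====
-- body of A's outer loop: award 3 points at each even index (indices are
-- always in range, len(points) == num_players throughout, so the total
-- forms pyGetD/pySetD are exact here), then points.sort(reverse=True)
def pyRoundA (num_players : Int) (pts : List Int) : List Int :=
  PySem.List.sorted
    ((PySem.List.pyRange 0 num_players 1).foldl
      (fun p i =>
        if PySem.Int.mod i 2 == 0 then
          PySem.List.pySetD p i (PySem.List.pyGetD p i 0 + 3)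
        else p) pts)
    (fun x => x) true

def simulate_tournament_max_points (num_players : Int) (num_rounds : Int) : List Int :=
  (PySem.List.pyRange 0 num_rounds 1).foldl
    (fun pts _ => pyRoundA num_players pts)
    (List.replicate num_players.toNat 0)

-- ===== PORT B =====
-- merge_desc: the two-pointer while loop as the obvious structural recursion
def mergeDesc : List Int → List Int → List Int
  | [], ys => ys
  | x :: xs, [] => x :: xs
  | x :: xs, y :: ys =>
      if x ≥ y then x :: mergeDesc xs (y :: ys) else y :: mergeDesc (x :: xs) ys

-- the 'for p in pts' loop of B, with its (winners, losers, even) state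
def splitLoop : List Int × List Int × Bool → List Int → List Int × List Int × Bool
  | s, [] => s
  | (w, o, even), p :: rest =>
      splitLoop (if even then (w ++ [p + 3], o, !even) else (w, o ++ [p], !even)) rest

def pyRoundB (pts : List Int) : List Int :=
  mergeDesc (splitLoop (([], [], true) : List Int × List Int × Bool) pts).1
    (splitLoop (([], [], true) : List Int × List Int × Bool) pts).2.1

def simulate_tournament_max_points_alt (num_players : Int) (num_rounds : Int) : List Int :=
  (PySem.List.pyRange 0 num_rounds 1).foldl
    (fun pts _ => pyRoundB pts)
    (List.replicate num_players.toNat 0)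

-- ===== PRECONDITION & SPEC =====
def Spec_simulate_tournament_max_points (num_players : Int) (num_rounds : Int) (out : List Int) : Prop := out = simulate_tournament_max_points_alt num_players num_rounds
instance (num_players : Int) (num_rounds : Int) (out : List Int) : Decidable (Spec_simulate_tournament_max_points num_players num_rounds out) := by unfold Spec_simulate_tournament_max_points; infer_instance

-- ===== CLAIM (what is proved, stated in full; the proofs are below) =====
def Claim_equal_simulate_tournament_max_points : Prop := ∀ (num_players : Int) (num_rounds : Int), Dom_simulate_tournament_max_points num_players num_rounds → Spec_simulate_tournament_max_points num_players num_rounds (simulate_tournament_max_points num_players num_rounds)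

-- ===== LEMMAS AND PROOFS =====

-- award 3 points at alternating positions, starting with flag b
def bump : Bool → List Int → List Int
  | _, [] => []
  | true, a :: l => (a + 3) :: bump false l
  | false, a :: l => a :: bump true l

-- the two parity sublists of a list (winners already bumped)
def wl : Bool → List Int → List Int × List Int
  | _, [] => ([], [])
  | true, a :: l => ((a + 3) :: (wl false l).1, (wl false l).2)
  | false, a :: l => ((wl true l).1, a :: (wl true l).2)

lemma splitLoop_eq (l : List Int) : ∀ (w o : List Int) (b : Bool),
    (splitLoop (w, o, b) l).1 = w ++ (wl b l).1 ∧
    (splitLoop (w, o, b) l).2.1 = o ++ (wl b l).2 := by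
  induction l with
  | nil => intro w o b; simp [splitLoop, wl]
  | cons a l ih =>
      intro w o b
      cases b <;> simp [splitLoop, wl, ih]

lemma bump_perm : ∀ (b : Bool) (l : List Int),
    (bump b l).Perm ((wl b l).1 ++ (wl b l).2) := by
  intro b l
  induction l generalizing b with
  | nil => cases b <;> simp [bump, wl]
  | cons a l ih =>
      cases b with
      | true => simpa [bump, wl] using (ih false)
      | false =>
          simp only [bump, wl]
          exact ((ih true).cons a).trans List.perm_middle.symm

lemma bump_length : ∀ (b : Bool) (l : List Int), (bump b l).length = l.length := by
  intro b l
  induction l generalizing b with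
  | nil => cases b <;> simp [bump]
  | cons a l ih => cases b <;> simp [bump, ih]

lemma wl_sublists : ∀ (b : Bool) (l : List Int),
    ∃ s t : List Int, s.Sublist l ∧ t.Sublist l ∧
      (wl b l).1 = s.map (· + 3) ∧ (wl b l).2 = t := by
  intro b l
  induction l generalizing b with
  | nil => exact ⟨[], [], by simp [wl], by simp [wl], by cases b <;> simp [wl], by cases b <;> simp [wl]⟩
  | cons a l ih =>
      cases b with
      | true =>
          obtain ⟨s, t, hs, ht, h1, h2⟩ := ih false
          exact ⟨a :: s, t, hs.cons₂ a, ht.cons a, by simp [wl, h1], by simp [wl, h2]⟩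
      | false =>
          obtain ⟨s, t, hs, ht, h1, h2⟩ := ih true
          exact ⟨s, a :: t, hs.cons a, ht.cons₂ a, by simp [wl, h1], by simp [wl, h2]⟩

lemma wl_pairwise (b : Bool) (l : List Int) (h : l.Pairwise (· ≥ ·)) :
    ((wl b l).1.Pairwise (· ≥ ·)) ∧ ((wl b l).2.Pairwise (· ≥ ·)) := by
  obtain ⟨s, t, hs, ht, h1, h2⟩ := wl_sublists b l
  refine ⟨?_, ?_⟩
  · rw [h1, List.pairwise_map]
    exact (h.sublist hs).imp (by intro a b hab; omega)
  · rw [h2]; exact h.sublist ht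

lemma mergeDesc_perm : ∀ (xs ys : List Int), (mergeDesc xs ys).Perm (xs ++ ys) := by
  intro xs ys
  fun_induction mergeDesc xs ys with
  | case1 ys => simp
  | case2 x xs => simp
  | case3 x xs y ys h ih => simpa using ih.cons x
  | case4 x xs y ys h ih => exact (ih.cons y).trans List.perm_middle.symm

lemma mergeDesc_pairwise : ∀ (xs ys : List Int),
    xs.Pairwise (· ≥ ·) → ys.Pairwise (· ≥ ·) → (mergeDesc xs ys).Pairwise (· ≥ ·) := by
  intro xs ys
  fun_induction mergeDesc xs ys with
  | case1 ys => intro _ h; exact h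
  | case2 x xs => intro h _; exact h
  | case3 x xs y ys h ih =>
      intro hx hy
      refine List.pairwise_cons.2 ⟨?_, ih (List.pairwise_cons.1 hx).2 hy⟩
      intro z hz
      have hz' : z ∈ xs ++ (y :: ys) := (mergeDesc_perm _ _).mem_iff.mp hz
      rcases List.mem_append.1 hz' with hzx | hzy
      · exact (List.pairwise_cons.1 hx).1 z hzx
      · rcases List.mem_cons.1 hzy with rfl | hzy'
        · exact h
        · have := (List.pairwise_cons.1 hy).1 z hzy'
          omega
  | case4 x xs y ys h ih =>
      intro hx hy
      refine List.pairwise_cons.2 ⟨?_, ih hx (List.pairwise_cons.1 hy).2⟩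
      intro z hz
      have hz' : z ∈ (x :: xs) ++ ys := (mergeDesc_perm _ _).mem_iff.mp hz
      rcases List.mem_append.1 hz' with hzx | hzy
      · rcases List.mem_cons.1 hzx with rfl | hzx'
        · omega
        · have := (List.pairwise_cons.1 hx).1 z hzx'
          omega
      · exact (List.pairwise_cons.1 hy).1 z hzy

-- a descending Pairwise rearrangement IS sorted(·, reverse=True)
lemma sortedDesc_eq (xs ys : List Int) (hp : ys.Perm xs) (hs : ys.Pairwise (· ≥ ·)) :
    PySem.List.sorted xs (fun x => x) true = ys := by
  refine List.eq_of_perm_of_sorted (le := fun a b => (a : Int) ≥ b) ?_ ?_ hs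
    (((PySem.List.sorted_perm xs (fun x => x) true)).trans hp.symm)
  · intro a b _ _ h1 h2; omega
  · have := PySem.List.sorted_pairwise_rev (κ := Int) xs (fun x => x)
    exact this.imp (by intro a b hab; exact hab)

lemma fmod_two_natCast (m : Nat) : Int.fmod (m : Int) 2 = ((m % 2 : Nat) : Int) := by
  rw [Int.fmod_eq_emod, if_pos (Or.inl (by norm_num))]
  omega

-- A's inner index loop, peeled off position by position
lemma innerA_fold : ∀ (suf pre : List Int),
    (PySem.List.pyRange (pre.length : Int) ((pre.length : Int) + (suf.length : Int)) 1).foldl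
      (fun p i =>
        if PySem.Int.mod i 2 == 0 then
          PySem.List.pySetD p i (PySem.List.pyGetD p i 0 + 3)
        else p) (pre ++ suf)
      = pre ++ bump (decide (pre.length % 2 = 0)) suf := by
  intro suf
  induction suf with
  | nil =>
      intro pre
      rw [PySem.List.pyRange_one_eq_nil (by simp)]
      cases h : decide (pre.length % 2 = 0) <;> simp [bump]
  | cons a suf ih =>
      intro pre
      have hlt : (pre.length : Int) < (pre.length : Int) + ((a :: suf).length : Int) := by
        simp only [List.length_cons]; push_cast; omega
      rw [PySem.List.pyRange_one_cons hlt, List.foldl_cons]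
      have hmod : PySem.Int.mod (pre.length : Int) 2 = ((pre.length % 2 : Nat) : Int) := by
        simp only [PySem.Int.mod]
        exact fmod_two_natCast pre.length
      have hget : PySem.List.pyGetD (pre ++ a :: suf) (pre.length : Int) 0 = a := by
        rw [PySem.List.pyGetD_natCast]
        simp [List.getD_eq_getElem?_getD]
      have hset : ∀ v : Int, PySem.List.pySetD (pre ++ a :: suf) (pre.length : Int) v
          = (pre ++ [v]) ++ suf := by
        intro v
        rw [PySem.List.pySetD_natCast, List.set_append_right _ _ (le_refl _)]
        simp
      have hrange : (pre.length : Int) + 1 + (suf.length : Int)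
          = (pre.length : Int) + ((a :: suf).length : Int) := by
        simp only [List.length_cons]; push_cast; omega
      by_cases hpar : pre.length % 2 = 0
      · have hcond : (PySem.Int.mod (pre.length : Int) 2 == 0) = true := by
          rw [hmod, hpar]; rfl
        rw [if_pos hcond, hget, hset]
        have ih' := ih (pre ++ [a + 3])
        rw [show ((pre ++ [a + 3]).length : Int) = (pre.length : Int) + 1 by simp] at ih'
        rw [hrange] at ih'
        rw [ih']
        rw [show decide ((pre ++ [a + 3]).length % 2 = 0) = false by simp; omega]
        rw [show decide (pre.length % 2 = 0) = true by simp [hpar]]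
        simp [bump]
      · have hcond : ¬ ((PySem.Int.mod (pre.length : Int) 2 == 0) = true) := by
          rw [hmod]; simp; omega
        rw [if_neg hcond]
        rw [show pre ++ a :: suf = (pre ++ [a]) ++ suf by simp]
        have ih' := ih (pre ++ [a])
        rw [show ((pre ++ [a]).length : Int) = (pre.length : Int) + 1 by simp] at ih'
        rw [hrange] at ih'
        rw [ih']
        rw [show decide ((pre ++ [a]).length % 2 = 0) = true by simp; omega]
        rw [show decide (pre.length % 2 = 0) = false by simp [hpar]]
        simp [bump]

-- the two round bodies agree on a sorted-descending state of the right length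
lemma roundStep_eq (np : Int) (pts : List Int) (hlen : (pts.length : Int) = max np 0)
    (hs : pts.Pairwise (· ≥ ·)) :
    pyRoundA np pts = pyRoundB pts ∧ (pyRoundB pts).Pairwise (· ≥ ·) ∧
      ((pyRoundB pts).length : Int) = max np 0 := by
  have hB1 : (pyRoundB pts).Perm (bump true pts) := by
    unfold pyRoundB
    have h1 := (splitLoop_eq pts [] [] true).1
    have h2 := (splitLoop_eq pts [] [] true).2
    simp only [List.nil_append] at h1 h2
    rw [h1, h2]
    exact (mergeDesc_perm _ _).trans (bump_perm true pts).symm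
  have hB2 : (pyRoundB pts).Pairwise (· ≥ ·) := by
    unfold pyRoundB
    have h1 := (splitLoop_eq pts [] [] true).1
    have h2 := (splitLoop_eq pts [] [] true).2
    simp only [List.nil_append] at h1 h2
    rw [h1, h2]
    exact mergeDesc_pairwise _ _ (wl_pairwise true pts hs).1 (wl_pairwise true pts hs).2
  refine ⟨?_, hB2, ?_⟩
  · unfold pyRoundA
    have hinner : (PySem.List.pyRange 0 np 1).foldl
        (fun p i =>
          if PySem.Int.mod i 2 == 0 then
            PySem.List.pySetD p i (PySem.List.pyGetD p i 0 + 3)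
          else p) pts = bump true pts := by
      by_cases hnp : np ≤ 0
      · have h0 : pts = [] := List.length_eq_zero_iff.mp (by omega)
        subst h0
        rw [PySem.List.pyRange_one_eq_nil hnp]
        simp [bump]
      · push_neg at hnp
        have hnp' : np = (pts.length : Int) := by omega
        have h := innerA_fold pts []
        simp only [List.length_nil, Nat.cast_zero, zero_add, List.nil_append,
          Nat.zero_mod, decide_true] at h
        rw [hnp']
        exact h
    rw [hinner]
    exact sortedDesc_eq _ _ hB1 hB2
  · rw [hB1.length_eq, bump_length]
    exact hlen

lemma outer_fold_eq (np : Int) : ∀ (l : List Int) (pts : List Int),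
    (pts.length : Int) = max np 0 → pts.Pairwise (· ≥ ·) →
    l.foldl (fun p _ => pyRoundA np p) pts = l.foldl (fun p _ => pyRoundB p) pts := by
  intro l
  induction l with
  | nil => intro pts _ _; rfl
  | cons x l ih =>
      intro pts hlen hs
      obtain ⟨heq, hs', hlen'⟩ := roundStep_eq np pts hlen hs
      simp only [List.foldl_cons]
      rw [heq]
      exact ih _ hlen' hs'

-- ===== VERDICT (by name: the statement is the Claim_ definition above) =====
theorem simulate_tournament_max_points_spec : Claim_equal_simulate_tournament_max_points := by
  intro np nr _
  unfold Spec_simulate_tournament_max_points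
  unfold simulate_tournament_max_points simulate_tournament_max_points_alt
  refine outer_fold_eq np _ _ ?_ ?_
  · simp only [List.length_replicate]; omega
  · exact List.pairwise_replicate.2 (Or.inr (le_refl (0 : Int)))
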